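-- pv_equiv track=rewrite | github.com/sarapil/arkan_help | arkan_help/arkan_help/utils/translation.py | _parse_po
-- ===== SOURCE A (Python) =====
-- def _parse_po(content: str) -> list[dict]:
-- 	"""Minimal PO parser – extracts msgid/msgstr pairs."""
-- 	units: list[dict] = []
-- 	current_id = current_str = ""
-- 	state = None
--
-- 	for line in content.splitlines():
-- 		line = line.strip()
-- 		if line.startswith("#"):
-- 			continue
-- 		if line.startswith("msgid "):
-- 			state = "id"
-- 			current_id = _po_unescape(line[6:].strip().strip('"'))
-- 		elif line.startswith("msgstr "):
-- 			state = "str"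
-- 			current_str = _po_unescape(line[7:].strip().strip('"'))
-- 		elif line.startswith('"') and state:
-- 			text = _po_unescape(line.strip('"'))
-- 			if state == "id":
-- 				current_id += text
-- 			else:
-- 				current_str += text
-- 		elif not line:
-- 			if current_id:
-- 				units.append({"source": current_id, "target": current_str})
-- 			current_id = current_str = ""
-- 			state = None
--
-- 	# Last pair
-- 	if current_id:
-- 		units.append({"source": current_id, "target": current_str})
--
-- 	return units
--
-- def _po_unescape(s: str) -> str:
-- 	return s.replace("\\n", "\n").replace('\\"', '"').replace("\\\\", "\\")
-- ===== SOURCE B (Python) =====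
-- def _po_unescape(s: str) -> str:
--     return s.replace("\\n", "\n").replace('\\"', '"').replace("\\\\", "\\")
--
--
-- def _emit_record(record: list[str]) -> list[dict]:
--     """Parse one blank-line-delimited record of stripped lines."""
--     src = tgt = ""
--     active = None
--     for line in record:
--         if line.startswith("#"):
--             continue
--         if line.startswith("msgid "):
--             active = "id"
--             src = _po_unescape(line[6:].strip().strip('"'))
--         elif line.startswith("msgstr "):
--             active = "str"
--             tgt = _po_unescape(line[7:].strip().strip('"'))
--         elif line.startswith('"') and active:
--             text = _po_unescape(line.strip('"'))
--             if active == "id":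
--                 src += text
--             else:
--                 tgt += text
--     if src:
--         return [{"source": src, "target": tgt}]
--     return []
--
--
-- def _parse_po(content: str) -> list[dict]:
--     """Split into records at blank (whitespace-only) lines, parse each record."""
--     records: list[list[str]] = []
--     cur: list[str] = []
--     for raw in content.splitlines():
--         line = raw.strip()
--         if line:
--             cur.append(line)
--         else:
--             records.append(cur)
--             cur = []
--     records.append(cur)
--     out: list[dict] = []
--     for rec in records:
--         out += _emit_record(rec)
--     return out
-- ===== Notes on version B (the rewrite author's own statement) =====
-- stated objective: alternative
-- what changed: A is a single stateful scan that flushes pending msgid/msgstr state at blank lines and once more after the loop; B first splits the stripped lines into blank-line-delimited records, then parses each record independently with a per-record fold and emits its pair, so the mid-loop flush and the trailing final-pair special case disappear.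
import Mathlib
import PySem

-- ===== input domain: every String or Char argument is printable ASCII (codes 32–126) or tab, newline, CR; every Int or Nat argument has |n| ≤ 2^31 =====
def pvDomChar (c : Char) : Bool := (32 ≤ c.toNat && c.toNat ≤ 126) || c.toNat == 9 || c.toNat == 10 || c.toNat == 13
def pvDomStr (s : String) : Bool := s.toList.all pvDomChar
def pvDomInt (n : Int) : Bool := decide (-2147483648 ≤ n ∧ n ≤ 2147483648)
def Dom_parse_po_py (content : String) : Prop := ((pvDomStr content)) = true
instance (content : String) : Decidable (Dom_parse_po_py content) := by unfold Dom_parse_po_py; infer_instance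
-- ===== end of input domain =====

-- B re-decomposes A's single stateful scan: split the lines into blank-line-delimited
-- records first, then parse each record independently and emit per record (objective: alternative).

-- ===== PORT A =====
def po_unescape (s : String) : String :=
  PySem.Str.replace (PySem.Str.replace (PySem.Str.replace s "\\n" "\n") "\\\"" "\"") "\\\\" "\\"

def aStep (acc : List (List (String × String)) × String × String × Option String)
    (rawLine : String) : List (List (String × String)) × String × String × Option String :=
  match acc with
  | (units, cid, cstr, state) =>
    let line := PySem.Str.strip rawLine
    if PySem.Str.startswith line "#" then (units, cid, cstr, state)
    else if PySem.Str.startswith line "msgid " then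
      (units, po_unescape (PySem.Str.stripChars (PySem.Str.strip (PySem.Str.slice line (some 6) none)) "\""), cstr, some "id")
    else if PySem.Str.startswith line "msgstr " then
      (units, cid, po_unescape (PySem.Str.stripChars (PySem.Str.strip (PySem.Str.slice line (some 7) none)) "\""), some "str")
    else if PySem.Str.startswith line "\"" && state.isSome then
      let text := po_unescape (PySem.Str.stripChars line "\"")
      if state = some "id" then (units, cid ++ text, cstr, state)
      else (units, cid, cstr ++ text, state)
    else if line = "" then
      (if cid ≠ "" then units ++ [[("source", cid), ("target", cstr)]] else units, "", "", none)
    else (units, cid, cstr, state)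

def parse_po_py (content : String) : List (List (String × String)) :=
  match (PySem.Str.splitlines content).foldl aStep ([], "", "", none) with
  | (units, cid, cstr, _) =>
    if cid ≠ "" then units ++ [[("source", cid), ("target", cstr)]] else units

-- ===== PORT B =====
def recStep (acc : String × String × Option String) (line : String) :
    String × String × Option String :=
  match acc with
  | (src, tgt, active) =>
    if PySem.Str.startswith line "#" then (src, tgt, active)
    else if PySem.Str.startswith line "msgid " then
      (po_unescape (PySem.Str.stripChars (PySem.Str.strip (PySem.Str.slice line (some 6) none)) "\""), tgt, some "id")
    else if PySem.Str.startswith line "msgstr " then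
      (src, po_unescape (PySem.Str.stripChars (PySem.Str.strip (PySem.Str.slice line (some 7) none)) "\""), some "str")
    else if PySem.Str.startswith line "\"" && active.isSome then
      let text := po_unescape (PySem.Str.stripChars line "\"")
      if active = some "id" then (src ++ text, tgt, active)
      else (src, tgt ++ text, active)
    else (src, tgt, active)

def emitRecord (record : List String) : List (List (String × String)) :=
  match record.foldl recStep ("", "", none) with
  | (src, tgt, _) => if src ≠ "" then [[("source", src), ("target", tgt)]] else []

def gStep (acc : List (List String) × List String) (raw : String) :
    List (List String) × List String :=
  let line := PySem.Str.strip raw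
  if line ≠ "" then (acc.1, acc.2 ++ [line]) else (acc.1 ++ [acc.2], [])

def parse_po_py_alt (content : String) : List (List (String × String)) :=
  match (PySem.Str.splitlines content).foldl gStep ([], []) with
  | (records, cur) => (records ++ [cur]).foldl (fun out rec => out ++ emitRecord rec) []

-- ===== PRECONDITION & SPEC =====
def Spec_parse_po_py (content : String) (out : List (List (String × String))) : Prop := out = parse_po_py_alt content
instance (content : String) (out : List (List (String × String))) : Decidable (Spec_parse_po_py content out) := by unfold Spec_parse_po_py; infer_instance

-- ===== CLAIM (what is proved, stated in full; the proofs are below) =====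
def Claim_equal_parse_po_py : Prop := ∀ (content : String), Dom_parse_po_py content → Spec_parse_po_py content (parse_po_py content)

-- ===== LEMMAS AND PROOFS =====

-- "append the pending pair if source is nonempty"
def emitIf (cid cstr : String) : List (List (String × String)) :=
  if cid ≠ "" then [[("source", cid), ("target", cstr)]] else []

-- reference scan: consume raw lines from state s, flushing at blank lines and at the end
def bRun (s : String × String × Option String) : List String → List (List (String × String))
  | [] => emitIf s.1 s.2.1
  | l :: ls =>
    if PySem.Str.strip l = "" then emitIf s.1 s.2.1 ++ bRun ("", "", none) ls
    else bRun (recStep s (PySem.Str.strip l)) ls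

lemma swc_hash : PySem.Chars.startswith [] ['#'] = false := by decide
lemma swc_msgid : PySem.Chars.startswith [] ['m', 's', 'g', 'i', 'd', ' '] = false := by decide
lemma swc_msgstr : PySem.Chars.startswith [] ['m', 's', 'g', 's', 't', 'r', ' '] = false := by decide
lemma swc_quote : PySem.Chars.startswith [] ['\"'] = false := by decide

lemma aStep_eq (units : List (List (String × String))) (cid cstr : String)
    (st : Option String) (l : String) :
    aStep (units, cid, cstr, st) l =
      if PySem.Str.strip l = "" then (units ++ emitIf cid cstr, "", "", none)
      else (units, recStep (cid, cstr, st) (PySem.Str.strip l)) := by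
  by_cases h : PySem.Str.strip l = ""
  · simp [aStep, emitIf, h, swc_hash, swc_msgid, swc_msgstr, swc_quote]
    split_ifs <;> simp
  · simp [aStep, recStep, h]
    split_ifs <;> rfl

-- the trailing "last pair" flush applied to the loop state
def finA (q : List (List (String × String)) × String × String × Option String) :
    List (List (String × String)) :=
  if q.2.1 ≠ "" then q.1 ++ [[("source", q.2.1), ("target", q.2.2.1)]] else q.1

lemma foldA (ls : List String) (units : List (List (String × String)))
    (cid cstr : String) (st : Option String) :
    finA (ls.foldl aStep (units, cid, cstr, st)) = units ++ bRun (cid, cstr, st) ls := by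
  induction ls generalizing units cid cstr st with
  | nil =>
    simp [finA, bRun, emitIf]
    split_ifs <;> simp
  | cons l ls ih =>
    rw [List.foldl_cons, aStep_eq]
    by_cases h : PySem.Str.strip l = ""
    · rw [if_pos h, ih]
      simp [bRun, h]
    · rw [if_neg h, ih]
      simp [bRun, h]

lemma emitRecord_eq (record : List String) :
    emitRecord record = emitIf (record.foldl recStep ("", "", none)).1
      (record.foldl recStep ("", "", none)).2.1 := by
  simp [emitRecord, emitIf]

lemma foldB (ls : List String) (records : List (List String)) (cur : List String) :
    ((ls.foldl gStep (records, cur)).1 ++ [(ls.foldl gStep (records, cur)).2]).flatMap emitRecord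
      = records.flatMap emitRecord ++ bRun (cur.foldl recStep ("", "", none)) ls := by
  induction ls generalizing records cur with
  | nil => simp [bRun, emitRecord_eq]
  | cons l ls ih =>
    rw [List.foldl_cons]
    by_cases h : PySem.Str.strip l = ""
    · have : gStep (records, cur) l = (records ++ [cur], []) := by simp [gStep, h]
      rw [this, ih]
      simp [bRun, h, emitRecord_eq]
    · have : gStep (records, cur) l = (records, cur ++ [PySem.Str.strip l]) := by simp [gStep, h]
      rw [this, ih]
      simp [bRun, h]

-- ===== VERDICT (by name: the statement is the Claim_ definition above) =====
theorem parse_po_py_spec : Claim_equal_parse_po_py := by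
  intro content _
  unfold Spec_parse_po_py parse_po_py parse_po_py_alt
  rcases hA : (PySem.Str.splitlines content).foldl aStep ([], "", "", none) with ⟨u, c, s, st⟩
  rcases hB : (PySem.Str.splitlines content).foldl gStep ([], []) with ⟨rs, cur⟩
  have h1 := foldA (PySem.Str.splitlines content) [] "" "" none
  have h2 := foldB (PySem.Str.splitlines content) [] []
  rw [hA] at h1
  rw [hB] at h2
  simp only [List.foldl_nil, List.flatMap_nil, List.nil_append] at h1 h2
  have h3 : finA (u, c, s, st)
      = List.foldl (fun out rec => out ++ emitRecord rec) [] (rs ++ [cur]) := by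
    rw [h1, ← h2, PySem.List.foldl_append_eq_flatMap, List.nil_append]
  simpa [finA] using h3
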